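-- pv_equiv track=rewrite | github.com/tntpsu/duck-ops | runtime/trend_ranker.py | theme_family_key
-- ===== SOURCE A (Python) =====
-- from typing import Any
--
-- THEME_NOISE_TOKENS = {"duck", "ducks", "rubber", "jeep", "collectible"}
--
-- THEME_VARIANT_TOKENS = {
--     "pink",
--     "black",
--     "white",
--     "red",
--     "blue",
--     "green",
--     "yellow",
--     "purple",
--     "orange",
--     "gray",
--     "grey",
--     "brown",
--     "tan",
--     "gold",
--     "silver",
-- }
--
-- def normalized_theme_tokens(value: str | None) -> tuple[str, ...]:
--     raw = (value or "").lower()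
--     cleaned = []
--     token = []
--     for char in raw:
--         if char.isalnum():
--             token.append(char)
--             continue
--         if token:
--             cleaned.append("".join(token))
--             token = []
--     if token:
--         cleaned.append("".join(token))
--     return tuple(cleaned)
--
-- def theme_family_key(decision: dict[str, Any]) -> tuple[str, ...]:
--     tokens = [
--         token
--         for token in normalized_theme_tokens(decision.get("theme") or decision.get("title") or "")
--         if token not in THEME_NOISE_TOKENS and token not in THEME_VARIANT_TOKENS
--     ]
--     if not tokens:
--         tokens = [
--             token
--             for token in normalized_theme_tokens(decision.get("theme") or decision.get("title") or "")
--             if token not in THEME_NOISE_TOKENS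
--         ]
--     return tuple(tokens)
-- ===== SOURCE B (Python) =====
-- THEME_NOISE_TOKENS = {"duck", "ducks", "rubber", "jeep", "collectible"}
--
-- THEME_VARIANT_TOKENS = {
--     "pink", "black", "white", "red", "blue", "green", "yellow", "purple",
--     "orange", "gray", "grey", "brown", "tan", "gold", "silver",
-- }
--
-- def theme_family_key(decision):
--     text = (decision.get("theme") or decision.get("title") or "").lower()
--     words = "".join(c if c.isalnum() else " " for c in text).split()
--     base = [w for w in words if w not in THEME_NOISE_TOKENS]
--     primary = [w for w in base if w not in THEME_VARIANT_TOKENS]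
--     return tuple(primary or base)
-- ===== Notes on version B (the rewrite author's own statement) =====
-- stated objective: simpler
-- what changed: B tokenizes once by replacing non-alphanumeric characters with spaces and calling str.split(), then derives the strict key by filtering the noise-filtered base list, expressing the fallback as 'primary or base' instead of A's two independent tokenize-and-filter passes with a hand-rolled character accumulator loop.
import Mathlib
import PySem

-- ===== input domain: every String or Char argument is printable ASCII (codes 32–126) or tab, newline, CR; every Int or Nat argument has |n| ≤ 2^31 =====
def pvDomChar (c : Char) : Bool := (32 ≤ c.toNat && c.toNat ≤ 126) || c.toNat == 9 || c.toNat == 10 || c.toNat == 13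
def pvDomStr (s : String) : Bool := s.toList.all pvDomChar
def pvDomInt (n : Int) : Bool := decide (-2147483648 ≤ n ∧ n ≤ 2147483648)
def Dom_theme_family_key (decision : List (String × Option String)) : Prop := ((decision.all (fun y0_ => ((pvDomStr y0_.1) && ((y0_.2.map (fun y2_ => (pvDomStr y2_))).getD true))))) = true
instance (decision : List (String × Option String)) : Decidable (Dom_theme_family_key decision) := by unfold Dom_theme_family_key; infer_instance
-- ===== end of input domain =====

-- B restructures A: one tokenization (replace non-alnum with spaces, then split) and the
-- fallback expressed as "primary or base" carved from one noise-filtered list (objective: simpler).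

-- shared module constants and the `decision.get("theme") or decision.get("title") or ""` chain
-- (identical lines in both Pythons)
def THEME_NOISE_TOKENS : List String := ["duck", "ducks", "rubber", "jeep", "collectible"]

def THEME_VARIANT_TOKENS : List String :=
  ["pink", "black", "white", "red", "blue", "green", "yellow", "purple",
   "orange", "gray", "grey", "brown", "tan", "gold", "silver"]

-- Python `x or y` where x : str|None|missing — falsy iff missing, None or ""
def tfk_orStr (o : Option (Option String)) (rest : String) : String :=
  match o with
  | some (some s) => if s = "" then rest else s
  | _ => rest

def tfk_chosen (decision : List (String × Option String)) : String :=
  tfk_orStr (PySem.Dict.get? (PySem.Dict.mk decision) "theme")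
    (tfk_orStr (PySem.Dict.get? (PySem.Dict.mk decision) "title") "")

-- ===== PORT A =====
-- A's character loop: cleaned = finished tokens, token = the current run of alnum chars
def tfk_loopA : List Char → List (List Char) → List Char → List String
  | [], cleaned, token =>
      (if token.isEmpty then cleaned else cleaned ++ [token]).map String.ofList
  | c :: rest, cleaned, token =>
      if PySem.Chars.isalnum c then tfk_loopA rest cleaned (token ++ [c])
      else if token.isEmpty then tfk_loopA rest cleaned token
      else tfk_loopA rest (cleaned ++ [token]) []

-- call sites always pass a str (the `or ""` default), so the parameter is String
def normalized_theme_tokens (value : String) : List String :=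
  tfk_loopA (PySem.Chars.lower value.toList) [] []

def theme_family_key (decision : List (String × Option String)) : List String :=
  let tokens := (normalized_theme_tokens (tfk_chosen decision)).filter
      (fun t => !(THEME_NOISE_TOKENS.contains t) && !(THEME_VARIANT_TOKENS.contains t))
  let tokens := if tokens.isEmpty then
      (normalized_theme_tokens (tfk_chosen decision)).filter
        (fun t => !(THEME_NOISE_TOKENS.contains t))
    else tokens
  tokens

-- ===== PORT B =====
def tfk_words (text : String) : List String :=
  PySem.Str.split₀ (String.ofList
    (text.toList.map (fun c => if PySem.Chars.isalnum c then c else ' ')))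

def theme_family_key_alt (decision : List (String × Option String)) : List String :=
  let words := tfk_words (PySem.Str.lower (tfk_chosen decision))
  let base := words.filter (fun w => !(THEME_NOISE_TOKENS.contains w))
  let primary := base.filter (fun w => !(THEME_VARIANT_TOKENS.contains w))
  if primary.isEmpty then base else primary

-- ===== PRECONDITION & SPEC =====
def Spec_theme_family_key (decision : List (String × Option String)) (out : List String) : Prop := out = theme_family_key_alt decision
instance (decision : List (String × Option String)) (out : List String) : Decidable (Spec_theme_family_key decision out) := by unfold Spec_theme_family_key; infer_instance

-- ===== CLAIM (what is proved, stated in full; the proofs are below) =====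
def Claim_equal_theme_family_key : Prop := ∀ (decision : List (String × Option String)), Dom_theme_family_key decision → Spec_theme_family_key decision (theme_family_key decision)

-- ===== LEMMAS AND PROOFS =====

lemma tfk_alnum_not_space (c : Char) (h : PySem.Chars.isalnum c = true) :
    PySem.Chars.isspace c = false := by
  simp [PySem.Chars.isalnum, PySem.Chars.isalpha, PySem.Chars.isupper, PySem.Chars.islower,
    PySem.Chars.isdigit, Char.le_def, UInt32.le_iff_toNat_le, Char.toNat_val] at h
  simp [PySem.Chars.isspace]
  omega

lemma tfk_loop_eq (cs : List Char) : ∀ (cleaned : List (List Char)) (token : List Char),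
    tfk_loopA cs cleaned token =
      (PySem.Chars.split₀.go
        (cs.map (fun c => if PySem.Chars.isalnum c then c else ' '))
        token.reverse cleaned.reverse).map String.ofList := by
  induction cs with
  | nil =>
      intro cleaned token
      simp [tfk_loopA, PySem.Chars.split₀.go]
  | cons c rest ih =>
      intro cleaned token
      by_cases h : PySem.Chars.isalnum c = true
      · simp [tfk_loopA, h, PySem.Chars.split₀.go, tfk_alnum_not_space c h, ih]
      · have hsp : PySem.Chars.isspace ' ' = true := by decide
        rw [show ((c :: rest).map (fun c => if PySem.Chars.isalnum c then c else ' '))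
              = ' ' :: rest.map (fun c => if PySem.Chars.isalnum c then c else ' ') by simp [h]]
        by_cases ht : token.isEmpty
        · have : token = [] := by simpa using ht
          subst this
          simp [tfk_loopA, h, PySem.Chars.split₀.go, hsp, ih]
        · simp [tfk_loopA, h, ht, PySem.Chars.split₀.go, hsp, ih]

lemma tfk_tokens_eq (s : String) :
    normalized_theme_tokens s = tfk_words (PySem.Str.lower s) := by
  rw [normalized_theme_tokens, tfk_loop_eq]
  simp [tfk_words, PySem.Str.split₀, PySem.Chars.split₀]

-- ===== VERDICT (by name: the statement is the Claim_ definition above) =====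
theorem theme_family_key_spec : Claim_equal_theme_family_key := by
  intro decision _
  unfold Spec_theme_family_key theme_family_key theme_family_key_alt
  rw [tfk_tokens_eq]
  simp only [List.filter_filter]
  rw [show (fun w => !THEME_VARIANT_TOKENS.contains w && !THEME_NOISE_TOKENS.contains w)
        = (fun t => !THEME_NOISE_TOKENS.contains t && !THEME_VARIANT_TOKENS.contains t) by
      funext t; exact Bool.and_comm _ _]
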